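-- pv_equiv track=rewrite | github.com/772vjrvj/pythoncrawling | kmong/ko/논문pdf/main최종1.py | find_capital_dot_space_pattern
-- ===== SOURCE A (Python) =====
-- def find_capital_dot_space_pattern(text):
--     # 문자열 길이가 6 이상일 때만 검사
--     for i in range(len(text) - 5):  # 패턴이 6글자이므로 len(text) - 5까지 확인
--         if (text[i].isupper() and               # 첫 번째는 대문자
--                 text[i + 1] == '.' and              # 두 번째는 점
--                 text[i + 2] == ' ' and              # 세 번째는 공백
--                 text[i + 3].isupper() and           # 네 번째는 대문자
--                 text[i + 4] == '.' and              # 다섯 번째는 점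
--                 text[i + 5] == ' '):                # 여섯 번째는 공백
--             return True  # 패턴이 발견되면 True 반환
--     return False  # 패턴이 없으면 False 반환
-- ===== SOURCE B (Python) =====
-- def find_capital_dot_space_pattern(text):
--     start = 0
--     while True:
--         j = text.find('. ', start)
--         if j == -1:
--             return False
--         if (j >= 1 and j + 4 < len(text)
--                 and text[j - 1].isupper()
--                 and text[j + 2].isupper()
--                 and text[j + 3] == '.'
--                 and text[j + 4] == ' '):
--             return True
--         start = j + 1
-- ===== Notes on version B (the rewrite author's own statement) =====
-- stated objective: faster
-- what changed: Instead of checking all six pattern characters at every index, B uses str.find to jump directly between occurrences of the dot-space delimiter and verifies the surrounding characters only there.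
import Mathlib
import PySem

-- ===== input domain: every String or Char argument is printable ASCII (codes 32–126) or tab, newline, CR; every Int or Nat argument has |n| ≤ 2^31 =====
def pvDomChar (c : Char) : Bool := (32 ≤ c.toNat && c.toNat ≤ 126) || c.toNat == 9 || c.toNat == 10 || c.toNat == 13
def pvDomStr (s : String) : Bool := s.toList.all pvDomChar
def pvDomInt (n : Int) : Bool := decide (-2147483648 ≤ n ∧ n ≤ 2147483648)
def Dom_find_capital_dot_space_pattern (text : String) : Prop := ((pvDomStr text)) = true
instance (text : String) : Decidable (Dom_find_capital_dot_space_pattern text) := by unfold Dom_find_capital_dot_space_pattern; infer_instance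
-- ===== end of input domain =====

-- B replaces A's per-index six-character scan with a loop that jumps between '. '
-- occurrences via str.find and verifies the surrounding characters only there
-- (intended faster by a constant factor: find skips most positions).

-- ===== PORT A =====
-- the six-character test at index i; all six indices are < cs.length whenever the
-- loop calls this (i < cs.length - 5), so List.getD is exact for Python's text[i+k]
def pvPatA (cs : List Char) (i : Nat) : Bool :=
  PySem.Chars.isupper (cs.getD i 'a') &&
  (cs.getD (i + 1) 'a' == '.') &&
  (cs.getD (i + 2) 'a' == ' ') &&
  PySem.Chars.isupper (cs.getD (i + 3) 'a') &&
  (cs.getD (i + 4) 'a' == '.') &&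
  (cs.getD (i + 5) 'a' == ' ')

-- for i in range(len(text) - 5): if <pattern at i>: return True / return False
def pvLoopA (cs : List Char) (stop i : Nat) : Bool :=
  if i < stop then
    (if pvPatA cs i then true else pvLoopA cs stop (i + 1))
  else false
termination_by stop - i

-- range(len(text)-5) is empty when len(text) < 6, matching Nat truncated subtraction
def find_capital_dot_space_pattern (text : String) : Bool :=
  pvLoopA text.toList (text.length - 5) 0

-- ===== PORT B =====
-- the guard around a found '. ' at index j; the bound checks come first (same
-- short-circuit order as the Python), so getD is exact where it is reached
def pvCheckB (cs : List Char) (j : Nat) : Bool :=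
  decide (1 ≤ j) && decide (j + 4 < cs.length) &&
  PySem.Chars.isupper (cs.getD (j - 1) 'a') &&
  PySem.Chars.isupper (cs.getD (j + 2) 'a') &&
  (cs.getD (j + 3) 'a' == '.') &&
  (cs.getD (j + 4) 'a' == ' ')

-- while True: j = text.find('. ', start); if j == -1: return False;
--             if <guard at j>: return True; start = j + 1
-- Python binds j = text.find(...) once; the pure call is repeated here verbatim.
-- fuel makes the while-loop structural; length+1 fuel always suffices (proved below)
def pvLoopB (cs : List Char) (start : Nat) : Nat → Bool
  | 0 => false
  | fuel + 1 =>
    if PySem.Chars.findFrom cs ['.', ' '] (start : Int) none = -1 then false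
    else if pvCheckB cs (PySem.Chars.findFrom cs ['.', ' '] (start : Int) none).toNat then true
    else pvLoopB cs ((PySem.Chars.findFrom cs ['.', ' '] (start : Int) none).toNat + 1) fuel

def find_capital_dot_space_pattern_alt (text : String) : Bool :=
  pvLoopB text.toList 0 (text.length + 1)

-- ===== PRECONDITION & SPEC =====
def Spec_find_capital_dot_space_pattern (text : String) (out : Bool) : Prop := out = find_capital_dot_space_pattern_alt text
instance (text : String) (out : Bool) : Decidable (Spec_find_capital_dot_space_pattern text out) := by unfold Spec_find_capital_dot_space_pattern; infer_instance

-- ===== CLAIM (what is proved, stated in full; the proofs are below) =====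
def Claim_equal_find_capital_dot_space_pattern : Prop := ∀ (text : String), Dom_find_capital_dot_space_pattern text → Spec_find_capital_dot_space_pattern text (find_capital_dot_space_pattern text)

-- ===== LEMMAS AND PROOFS =====

-- B's success condition at an occurrence index j
def pvGoodB (cs : List Char) (j : Nat) : Prop :=
  ['.', ' '] <+: cs.drop j ∧ pvCheckB cs j = true

lemma pv_two_prefix (t : List Char) (a b : Char) :
    [a, b] <+: t ↔ t[0]? = some a ∧ t[1]? = some b := by
  match t with
  | [] => simp
  | [x] => simp [List.cons_prefix_iff]
  | x :: y :: t => simp [List.cons_prefix_iff, eq_comm]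

lemma pv_pair_prefix_iff (cs : List Char) (j : Nat) :
    ['.', ' '] <+: cs.drop j ↔ (cs[j]? = some '.' ∧ cs[j + 1]? = some ' ') := by
  rw [pv_two_prefix]
  simp [List.getElem?_drop]

lemma pv_getD_eq_iff (cs : List Char) (i : Nat) (c : Char) (h : i < cs.length) :
    cs.getD i 'a' = c ↔ cs[i]? = some c := by
  simp [List.getD_eq_getElem?_getD, List.getElem?_eq_getElem h]

lemma pvLoopA_spec (cs : List Char) (stop : Nat) : ∀ i,
    pvLoopA cs stop i = true ↔ ∃ k, i ≤ k ∧ k < stop ∧ pvPatA cs k = true := by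
  have H : ∀ d i, stop - i ≤ d →
      (pvLoopA cs stop i = true ↔ ∃ k, i ≤ k ∧ k < stop ∧ pvPatA cs k = true) := by
    intro d
    induction d with
    | zero =>
      intro i hd
      have h : ¬ i < stop := by omega
      rw [pvLoopA, if_neg h]
      refine iff_of_false (by simp) ?_
      rintro ⟨k, h1, h2, -⟩; omega
    | succ d ih =>
      intro i hd
      rw [pvLoopA]
      by_cases h : i < stop
      · rw [if_pos h]
        by_cases hp : pvPatA cs i = true
        · rw [if_pos hp]
          exact iff_of_true rfl ⟨i, le_rfl, h, hp⟩
        · rw [if_neg hp, ih (i + 1) (by omega)]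
          constructor
          · rintro ⟨k, h1, h2, h3⟩; exact ⟨k, by omega, h2, h3⟩
          · rintro ⟨k, h1, h2, h3⟩
            refine ⟨k, ?_, h2, h3⟩
            rcases Nat.eq_or_lt_of_le h1 with rfl | h'
            · exact absurd h3 hp
            · omega
      · rw [if_neg h]
        refine iff_of_false (by simp) ?_
        rintro ⟨k, h1, h2, -⟩; omega
  intro i
  exact H (stop - i) i le_rfl

lemma pvLoopB_spec (fuel : Nat) : ∀ (cs : List Char) (s : Nat), s ≤ cs.length →
    cs.length + 1 - s ≤ fuel →
    (pvLoopB cs s fuel = true ↔ ∃ j, s ≤ j ∧ pvGoodB cs j) := by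
  induction fuel with
  | zero => intro cs s hs hf; omega
  | succ fuel ih =>
    intro cs s hs hf
    rw [pvLoopB]
    by_cases hj : PySem.Chars.findFrom cs ['.', ' '] (s : Int) none = -1
    · rw [if_pos hj]
      rw [PySem.Chars.findFrom_natCast_eq_neg_one_iff cs _ s hs] at hj
      refine iff_of_false (by simp) ?_
      rintro ⟨j, hsj, hpre, -⟩
      apply hj
      have hdd : cs.drop j = (cs.drop s).drop (j - s) := by
        rw [List.drop_drop]; congr 1; omega
      rw [hdd] at hpre
      exact hpre.isInfix.trans (List.drop_suffix _ _).isInfix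
    · obtain ⟨hle, hpre, hmin⟩ :=
        PySem.Chars.findFrom_natCast_spec cs ['.', ' '] s hs hj
      rw [if_neg hj]
      set j := PySem.Chars.findFrom cs ['.', ' '] (s : Int) none with hjdef
      have hj0 : (0 : Int) ≤ j := le_trans (by positivity) hle
      have hsjn : s ≤ j.toNat := by omega
      have hjlen : j.toNat + 2 ≤ cs.length := by
        have hl := hpre.length_le
        simp at hl; omega
      by_cases hc : pvCheckB cs j.toNat = true
      · rw [if_pos hc]
        exact iff_of_true rfl ⟨j.toNat, hsjn, hpre, hc⟩
      · rw [if_neg hc, ih cs (j.toNat + 1) (by omega) (by omega)]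
        constructor
        · rintro ⟨j', h1, h2⟩; exact ⟨j', by omega, h2⟩
        · rintro ⟨j', h1, hpre', hc'⟩
          refine ⟨j', ?_, hpre', hc'⟩
          rcases Nat.lt_or_ge j' (j.toNat + 1) with h' | h'
          · rcases Nat.eq_or_lt_of_le (Nat.le_of_lt_succ h') with rfl | h''
            · exact absurd hc' hc
            · exact absurd hpre' (hmin j' h1 h'')
          · exact h'

lemma pv_bridge (cs : List Char) :
    (∃ k, k < cs.length - 5 ∧ pvPatA cs k = true) ↔ (∃ j, pvGoodB cs j) := by
  constructor
  · rintro ⟨k, hk, hp⟩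
    have hk5 : k + 5 < cs.length := by omega
    simp only [pvPatA, Bool.and_eq_true, beq_iff_eq] at hp
    obtain ⟨⟨⟨⟨⟨h0, h1⟩, h2⟩, h3⟩, h4⟩, h5⟩ := hp
    refine ⟨k + 1, ?_, ?_⟩
    · rw [pv_pair_prefix_iff]
      exact ⟨(pv_getD_eq_iff cs (k + 1) '.' (by omega)).1 h1,
             (pv_getD_eq_iff cs (k + 1 + 1) ' ' (by omega)).1 (by simpa using h2)⟩
    · simp only [pvCheckB, Bool.and_eq_true, beq_iff_eq, decide_eq_true_eq]
      refine ⟨⟨⟨⟨⟨by omega, by omega⟩, by simpa using h0⟩, by simpa using h3⟩,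
              by simpa using h4⟩, by simpa using h5⟩
  · rintro ⟨j, hpre, hc⟩
    simp only [pvCheckB, Bool.and_eq_true, beq_iff_eq, decide_eq_true_eq] at hc
    obtain ⟨⟨⟨⟨⟨hj1, hj4⟩, hu1⟩, hu2⟩, hd⟩, hsp⟩ := hc
    rw [pv_pair_prefix_iff] at hpre
    refine ⟨j - 1, by omega, ?_⟩
    simp only [pvPatA, Bool.and_eq_true, beq_iff_eq]
    have e1 : j - 1 + 1 = j := by omega
    have e2 : j - 1 + 2 = j + 1 := by omega
    have e3 : j - 1 + 3 = j + 2 := by omega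
    have e4 : j - 1 + 4 = j + 3 := by omega
    have e5 : j - 1 + 5 = j + 4 := by omega
    refine ⟨⟨⟨⟨⟨hu1, ?_⟩, ?_⟩, ?_⟩, ?_⟩, ?_⟩
    · rw [e1, pv_getD_eq_iff cs j '.' (by omega)]; exact hpre.1
    · rw [e2, pv_getD_eq_iff cs (j + 1) ' ' (by omega)]; exact hpre.2
    · rw [e3]; exact hu2
    · rw [e4]; exact hd
    · rw [e5]; exact hsp

-- ===== VERDICT (by name: the statement is the Claim_ definition above) =====
theorem find_capital_dot_space_pattern_spec : Claim_equal_find_capital_dot_space_pattern := by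
  intro text _
  unfold Spec_find_capital_dot_space_pattern
  unfold find_capital_dot_space_pattern find_capital_dot_space_pattern_alt
  have hlen : text.length = text.toList.length := by simp
  rw [Bool.eq_iff_iff, pvLoopA_spec, hlen,
      pvLoopB_spec (text.toList.length + 1) text.toList 0 (Nat.zero_le _) (by omega)]
  have hb := pv_bridge text.toList
  constructor
  · rintro ⟨k, -, h1, h2⟩
    obtain ⟨j, hj⟩ := hb.1 ⟨k, h1, h2⟩
    exact ⟨j, Nat.zero_le _, hj⟩
  · rintro ⟨j, -, h1⟩
    obtain ⟨k, h2, h3⟩ := hb.2 ⟨j, h1⟩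
    exact ⟨k, Nat.zero_le _, h2, h3⟩
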